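-- pv_equiv track=rewrite | github.com/wujiay-cpu/AI_selection_Problem | backend/back_algorithm.py | _prune_redundant_multi
-- ===== SOURCE A (Python) =====
-- import itertools
--
-- def _prune_redundant_multi(final_result, sample_pool, k, all_targets, s, required_cover):
--     """
--     改动3：针对 required_cover > 1 的冗余删除。
--     优化：使用增量维护覆盖计数，将 O(m*T) 降至 O(当前候选覆盖的目标数)，极大幅度提高速度。
--     """
--     if not final_result:
--         return final_result
--
--     # 预计算每个候选的 cover_map
--     def build_cover_map_for(cand):
--         c_set = set(cand)
--         cover_map = {}
--         for idx, t in enumerate(all_targets):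
--             inter = c_set.intersection(t)
--             if len(inter) >= s:
--                 cover_map[idx] = set(itertools.combinations(sorted(inter), s))
--         return cover_map
--
--     cover_maps = [build_cover_map_for(tuple(c)) for c in final_result]
--     num_targets = len(all_targets)
--
--     # 初始化全局覆盖状态，这里我们直接存储每个目标被哪些组合（具体是哪些大小为 s 的组合）覆盖了
--     # covered_elements[idx] = 包含所有候选覆盖该目标的元素的并集
--     # 这里由于要维护每个目标的元素个数，我们可以使用一个字典记录元素的引用计数
--     global_coverage = [{} for _ in range(num_targets)]
--
--     def add_coverage(cover_map):
--         for idx, elements in cover_map.items():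
--             for elem in elements:
--                 global_coverage[idx][elem] = global_coverage[idx].get(elem, 0) + 1
--
--     def remove_coverage(cover_map):
--         for idx, elements in cover_map.items():
--             for elem in elements:
--                 global_coverage[idx][elem] -= 1
--                 if global_coverage[idx][elem] == 0:
--                     del global_coverage[idx][elem]
--
--     # 初始化全局覆盖
--     for cmap in cover_maps:
--         add_coverage(cmap)
--
--     changed = True
--     while changed:
--         changed = False
--         m = len(final_result)
--         if m <= 1:
--             break
--
--         for i in range(m):
--             cmap = cover_maps[i]
--
--             # 模拟移除第 i 个候选
--             can_remove = True
--             for idx, elements in cmap.items():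
--                 # 计算移除后该目标还剩多少个不同的覆盖元素
--                 remaining_elements_count = len(global_coverage[idx])
--                 for elem in elements:
--                     if global_coverage[idx][elem] == 1:
--                         remaining_elements_count -= 1
--                 if remaining_elements_count < required_cover:
--                     can_remove = False
--                     break
--
--             if can_remove:
--                 # 确实可以移除，从全局覆盖中减去它的贡献
--                 remove_coverage(cmap)
--                 final_result.pop(i)
--                 cover_maps.pop(i)
--                 changed = True
--                 break  # 重新开始外层 while
--
--     return final_result
-- ===== SOURCE B (Python) =====
-- from itertools import combinations
--
--
-- def _prune_redundant_multi(final_result, sample_pool, k, all_targets, s, required_cover):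
--     """Single forward pass: check each candidate once against the current
--     survivors; a removal never re-enables an earlier kept candidate, so no
--     restart is needed.  Coverage is recomputed directly as set unions instead
--     of A's reference-counted dictionaries."""
--     if not final_result:
--         return final_result
--
--     def combo_sets(cand):
--         # per target: the set of size-s combinations of the intersection (empty if below s)
--         out = []
--         c_set = set(cand)
--         for t in all_targets:
--             inter = sorted(c_set & set(t))
--             out.append(set(combinations(inter, s)) if len(inter) >= s else set())
--         return out
--
--     kept = []
--     rest = [(c, combo_sets(c)) for c in final_result]
--     while rest:
--         cand, cov = rest.pop(0)
--         others = kept + rest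
--         if others and all(
--             required_cover <= len(set().union(*(o[1][idx] for o in others), set()))
--             for idx, here in enumerate(cov) if here
--         ):
--             continue  # redundant: drop it for good
--         kept.append((cand, cov))
--     final_result[:] = [c for c, _ in kept]
--     return final_result
-- ===== Notes on version B (the rewrite author's own statement) =====
-- stated objective: alternative
-- what changed: A repeatedly rescans the candidate list from the start after every removal and maintains reference-counted per-target coverage dictionaries; B makes a single forward pass (removals never re-enable an earlier kept candidate) and recomputes each candidate's coverage directly as set unions over the remaining candidates, with no mutable counter state.
import Mathlib
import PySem

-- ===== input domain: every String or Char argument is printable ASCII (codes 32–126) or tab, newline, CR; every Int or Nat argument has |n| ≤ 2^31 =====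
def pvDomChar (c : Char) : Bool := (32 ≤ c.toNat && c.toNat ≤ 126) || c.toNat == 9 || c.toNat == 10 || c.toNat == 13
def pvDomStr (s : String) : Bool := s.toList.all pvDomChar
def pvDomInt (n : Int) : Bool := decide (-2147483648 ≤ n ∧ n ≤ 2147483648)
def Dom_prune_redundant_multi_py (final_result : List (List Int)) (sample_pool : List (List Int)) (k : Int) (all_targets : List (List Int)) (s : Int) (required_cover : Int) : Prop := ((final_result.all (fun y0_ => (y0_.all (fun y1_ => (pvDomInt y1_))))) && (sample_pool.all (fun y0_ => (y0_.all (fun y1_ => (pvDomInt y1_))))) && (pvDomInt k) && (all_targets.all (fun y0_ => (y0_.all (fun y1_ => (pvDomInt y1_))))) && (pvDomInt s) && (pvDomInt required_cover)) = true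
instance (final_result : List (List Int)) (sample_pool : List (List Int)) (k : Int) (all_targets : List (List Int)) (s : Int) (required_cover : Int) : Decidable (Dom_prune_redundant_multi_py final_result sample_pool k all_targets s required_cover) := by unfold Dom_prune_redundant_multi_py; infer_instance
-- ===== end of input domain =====

-- B replaces A's restart-after-every-removal loop over reference-counted coverage
-- dictionaries by a single forward pass that recomputes coverage as set unions
-- (objective: alternative/simpler structure).  Both Pythons mutate final_result in
-- place the same way; the theorems below are about the returned value.

-- ===== PORT A =====
-- itertools.combinations(xs, r): r-element subsequences in itertools order (tuples as lists)
def pvCombos : Nat → List Int → List (List Int)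
  | 0, _ => [[]]
  | _ + 1, [] => []
  | r + 1, x :: xs => (pvCombos r xs).map (fun c => x :: c) ++ pvCombos (r + 1) xs

-- sorted(set(cand).intersection(t)); sorting distinct ints makes Python's set
-- iteration order irrelevant, so this is exact
def pvInterSorted (cand t : List Int) : List Int :=
  PySem.List.sorted (PySem.Set.inter (PySem.Set.ofList cand) t) (fun x => x) false

-- build_cover_map_for(cand); s.toNat is only reached with 0 ≤ s (Pre_) or with an empty target list
def pvBuildCoverMap (all_targets : List (List Int)) (s : Int) (cand : List Int) :
    PySem.Dict Int (List (List Int)) :=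
  (PySem.List.enumerate all_targets).foldl
    (fun cm p =>
      let inter := pvInterSorted cand p.2
      if s ≤ (inter.length : Int) then
        cm.insert p.1 (PySem.Set.ofList (pvCombos s.toNat inter))
      else cm)
    PySem.Dict.empty

-- the inner loop of add_coverage: global_coverage[idx][elem] = get(elem, 0) + 1 for each elem
def pvIncr (d : PySem.Dict (List Int) Int) (elems : List (List Int)) :
    PySem.Dict (List Int) Int :=
  elems.foldl (fun d e => d.insert e (d.getD e 0 + 1)) d

-- the inner loop of remove_coverage: decrement, delete the entry when it reaches 0
def pvDecr (d : PySem.Dict (List Int) Int) (elems : List (List Int)) :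
    PySem.Dict (List Int) Int :=
  elems.foldl (fun d e =>
    let v := d.getD e 0 - 1
    if v = 0 then d.erase e else d.insert e v) d

def pvAddCoverage (G : List (PySem.Dict (List Int) Int))
    (cmap : PySem.Dict Int (List (List Int))) : List (PySem.Dict (List Int) Int) :=
  cmap.items.foldl
    (fun G p => G.set p.1.toNat (pvIncr (G.getD p.1.toNat PySem.Dict.empty) p.2)) G

def pvRemoveCoverage (G : List (PySem.Dict (List Int) Int))
    (cmap : PySem.Dict Int (List (List Int))) : List (PySem.Dict (List Int) Int) :=
  cmap.items.foldl
    (fun G p => G.set p.1.toNat (pvDecr (G.getD p.1.toNat PySem.Dict.empty) p.2)) G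

-- the can_remove check: remaining distinct cover elements after simulated removal
def pvCanRemove (required_cover : Int) (G : List (PySem.Dict (List Int) Int))
    (cmap : PySem.Dict Int (List (List Int))) : Bool :=
  cmap.items.all fun p =>
    let d := G.getD p.1.toNat PySem.Dict.empty
    decide (required_cover ≤
      (d.size : Int) - ((p.2.filter fun e => d.getD e 0 == 1).length : Int))

-- the `for i in range(m): … break` scan: first index (from i, n tries left) passing p
def pvScan (p : Nat → Bool) : Nat → Nat → Option Nat
  | 0, _ => none
  | n + 1, i => if p i then some i else pvScan p n (i + 1)

-- the `while changed:` loop; every iteration but the last removes one candidate,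
-- so fuel = len(final_result) + 1 is exact
def pvLoopA (required_cover : Int) :
    Nat → List (List Int) → List (PySem.Dict Int (List (List Int))) →
    List (PySem.Dict (List Int) Int) → List (List Int)
  | 0, fr, _, _ => fr
  | fuel + 1, fr, cms, G =>
    if fr.length ≤ 1 then fr
    else
      match pvScan (fun i => pvCanRemove required_cover G (cms.getD i PySem.Dict.empty))
          fr.length 0 with
      | none => fr
      | some i =>
        pvLoopA required_cover fuel (fr.eraseIdx i) (cms.eraseIdx i)
          (pvRemoveCoverage G (cms.getD i PySem.Dict.empty))

def prune_redundant_multi_py (final_result : List (List Int)) (sample_pool : List (List Int)) (k : Int) (all_targets : List (List Int)) (s : Int) (required_cover : Int) : List (List Int) :=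
  if final_result = [] then final_result
  else
    let cover_maps := final_result.map fun c => pvBuildCoverMap all_targets s c
    let G := cover_maps.foldl pvAddCoverage
      (List.replicate all_targets.length PySem.Dict.empty)
    pvLoopA required_cover (final_result.length + 1) final_result cover_maps G

-- ===== PORT B =====
-- combo_sets(cand): per target the set of size-s combinations (empty below threshold)
def pvComboSets (all_targets : List (List Int)) (s : Int) (cand : List Int) :
    List (List (List Int)) :=
  all_targets.map fun t =>
    let inter := pvInterSorted cand t
    if s ≤ (inter.length : Int) then PySem.Set.ofList (pvCombos s.toNat inter) else []

-- len(set().union(*(o[1][idx] for o in others))) builds this union set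
def pvUnionAt (others : List (List Int × List (List (List Int)))) (idx : Int) :
    List (List Int) :=
  others.foldl (fun acc o => PySem.Set.union acc (o.2.getD idx.toNat [])) []

def pvCheck (required_cover : Int)
    (others : List (List Int × List (List (List Int))))
    (cov : List (List (List Int))) : Bool :=
  (PySem.List.enumerate cov).all fun p =>
    p.2.isEmpty || decide (required_cover ≤ ((pvUnionAt others p.1).length : Int))

-- the single forward pass over the candidate list
def pvLoopB (required_cover : Int) :
    List (List Int × List (List (List Int))) →
    List (List Int × List (List (List Int))) →
    List (List Int × List (List (List Int)))
  | kept, [] => kept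
  | kept, p :: rest =>
    if !(kept ++ rest).isEmpty && pvCheck required_cover (kept ++ rest) p.2 then
      pvLoopB required_cover kept rest
    else pvLoopB required_cover (kept ++ [p]) rest

def prune_redundant_multi_py_alt (final_result : List (List Int)) (sample_pool : List (List Int)) (k : Int) (all_targets : List (List Int)) (s : Int) (required_cover : Int) : List (List Int) :=
  if final_result = [] then final_result
  else
    (pvLoopB required_cover []
        (final_result.map fun c => (c, pvComboSets all_targets s c))).map Prod.fst

-- ===== PRECONDITION & SPEC =====
-- With final_result and all_targets both nonempty, a negative s reaches
-- itertools.combinations(_, s), which raises ValueError in both A and B;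
-- exactly those inputs are excluded.
def Pre_prune_redundant_multi_py (final_result : List (List Int)) (sample_pool : List (List Int)) (k : Int) (all_targets : List (List Int)) (s : Int) (required_cover : Int) : Prop :=
  0 ≤ s ∨ final_result = [] ∨ all_targets = []
instance (final_result : List (List Int)) (sample_pool : List (List Int)) (k : Int) (all_targets : List (List Int)) (s : Int) (required_cover : Int) : Decidable (Pre_prune_redundant_multi_py final_result sample_pool k all_targets s required_cover) := by unfold Pre_prune_redundant_multi_py; infer_instance

def pvWitness_prune_redundant_multi_py : List (List Int) × List (List Int) × Int × List (List Int) × Int × Int :=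
  ([[1, 2, 3], [2, 3, 4]], [], 0, [[2, 3]], 2, 1)

def Spec_prune_redundant_multi_py (final_result : List (List Int)) (sample_pool : List (List Int)) (k : Int) (all_targets : List (List Int)) (s : Int) (required_cover : Int) (out : List (List Int)) : Prop := out = prune_redundant_multi_py_alt final_result sample_pool k all_targets s required_cover
instance (final_result : List (List Int)) (sample_pool : List (List Int)) (k : Int) (all_targets : List (List Int)) (s : Int) (required_cover : Int) (out : List (List Int)) : Decidable (Spec_prune_redundant_multi_py final_result sample_pool k all_targets s required_cover out) := by unfold Spec_prune_redundant_multi_py; infer_instance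

-- ===== CLAIM (what is proved, stated in full; the proofs are below) =====
def Claim_equal_prune_redundant_multi_py : Prop := ∀ (final_result : List (List Int)) (sample_pool : List (List Int)) (k : Int) (all_targets : List (List Int)) (s : Int) (required_cover : Int), Dom_prune_redundant_multi_py final_result sample_pool k all_targets s required_cover → Pre_prune_redundant_multi_py final_result sample_pool k all_targets s required_cover → Spec_prune_redundant_multi_py final_result sample_pool k all_targets s required_cover (prune_redundant_multi_py final_result sample_pool k all_targets s required_cover)

-- ===== LEMMAS AND PROOFS =====

abbrev pvPair : Type := List Int × List (List (List Int))
abbrev pvD1 : Type := PySem.Dict (List Int) Int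

-- the cover map of a candidate, described from B's per-target cover list
def pvDictOf (cov : List (List (List Int))) : PySem.Dict Int (List (List Int)) :=
  PySem.Dict.mk ((PySem.List.enumerate cov).filter fun p => !p.2.isEmpty)

-- how many current candidates cover target j with element e
def pvCnt (l : List pvPair) (j : Nat) (e : List Int) : Nat :=
  l.countP fun p => decide (e ∈ p.2.getD j [])

-- A's global_coverage is exactly the reference counts of the current candidate list
def pvModels (G : List pvD1) (T : Nat) (l : List pvPair) : Prop :=
  G.length = T ∧ ∀ j, j < T →
    (G.getD j PySem.Dict.empty).keys.Nodup ∧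
    (∀ e, (G.getD j PySem.Dict.empty).getD e 0 = (pvCnt l j e : Int)) ∧
    (∀ e, e ∈ (G.getD j PySem.Dict.empty).keys ↔ 0 < pvCnt l j e)

def pvWF (T : Nat) (l : List pvPair) : Prop :=
  ∀ p ∈ l, p.2.length = T ∧ ∀ c ∈ p.2, c.Nodup

-- A's loop with the coverage state replaced by the pure per-candidate check
def pvPure (rc : Int) : Nat → List pvPair → List pvPair
  | 0, l => l
  | fuel + 1, l =>
    if l.length ≤ 1 then l
    else
      match pvScan (fun i => pvCheck rc (l.eraseIdx i) ((l.getD i ([], [])).2)) l.length 0 with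
      | none => l
      | some i => pvPure rc fuel (l.eraseIdx i)

theorem pvIncr_getD (d : pvD1) (elems : List (List Int)) (hnd : elems.Nodup) (e : List Int) :
    (pvIncr d elems).getD e 0 = d.getD e 0 + (if e ∈ elems then 1 else 0) := by
  unfold pvIncr
  rw [PySem.Dict.getD_foldl_insert_add_one]
  by_cases h : e ∈ elems
  · rw [List.count_eq_one_of_mem hnd h]; simp [h]
  · rw [List.count_eq_zero.mpr h]; simp [h]

theorem pvIncr_keys_nodup (d : pvD1) (elems : List (List Int)) (h : d.keys.Nodup) :
    (pvIncr d elems).keys.Nodup := by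
  unfold pvIncr
  exact PySem.Dict.nodup_keys_foldl_insert elems (fun d x => d.getD x 0 + 1) d h

theorem pvIncr_mem_keys (d : pvD1) (elems : List (List Int)) (e : List Int) :
    e ∈ (pvIncr d elems).keys ↔ e ∈ d.keys ∨ e ∈ elems := by
  unfold pvIncr
  rw [PySem.Dict.keys_foldl_insert elems (fun d x => d.getD x 0 + 1) d]
  exact PySem.Set.mem_update d.keys elems e

-- erase helpers (the prelude has no erase lemmas)
theorem pvKeys_erase {κ ν : Type} [BEq κ] (d : PySem.Dict κ ν) (k : κ) :
    (d.erase k).keys = d.keys.filter (fun x => !(x == k)) := by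
  show ((d.items.filter fun p => !p.1 == k).map (fun x => x.1)) = _
  rw [show (fun (p : κ × ν) => !p.1 == k) = ((fun x => !x == k) ∘ (fun (p : κ × ν) => p.1)) from rfl,
    ← List.filter_map]
  rfl

theorem pvGet?_erase_self {κ ν : Type} [BEq κ] [LawfulBEq κ] (d : PySem.Dict κ ν) (k : κ) :
    (d.erase k).get? k = none := by
  show Option.map _ (List.find? (fun p => p.1 == k) (d.items.filter fun p => !p.1 == k)) = none
  rw [List.find?_eq_none.mpr]
  · rfl
  · intro a ha
    have := List.of_mem_filter ha
    simpa using this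

theorem pvFind?_filter_of_imp {α : Type} (l : List α) (p q : α → Bool)
    (h : ∀ a, p a = true → q a = true) : List.find? p (l.filter q) = List.find? p l := by
  induction l with
  | nil => rfl
  | cons a l ih =>
    by_cases hq : q a
    · rw [List.filter_cons_of_pos hq]
      by_cases hp : p a
      · rw [List.find?_cons_of_pos hp, List.find?_cons_of_pos hp]
      · rw [List.find?_cons_of_neg (by simp [hp]), List.find?_cons_of_neg (by simp [hp]), ih]
    · have hp : p a = false := by
        cases hpa : p a
        · rfl
        · exact absurd (h a hpa) (by simp [hq])
      rw [List.filter_cons_of_neg (by simp [hq]), ih, List.find?_cons_of_neg (by simp [hp])]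

theorem pvGet?_erase_of_ne {κ ν : Type} [BEq κ] [LawfulBEq κ] (d : PySem.Dict κ ν) (k x : κ)
    (h : x ≠ k) : (d.erase k).get? x = d.get? x := by
  show Option.map _ (List.find? (fun p => p.1 == x) (d.items.filter fun p => !p.1 == k))
      = Option.map _ (List.find? (fun p => p.1 == x) d.items)
  rw [pvFind?_filter_of_imp]
  intro a ha
  have : a.1 = x := by simpa using ha
  simp [this, h]

theorem pvGetD_erase_self {κ ν : Type} [BEq κ] [LawfulBEq κ] (d : PySem.Dict κ ν) (k : κ) (v : ν) :
    (d.erase k).getD k v = v := by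
  rw [PySem.Dict.getD_eq_get?_getD, pvGet?_erase_self]; rfl

theorem pvGetD_erase_of_ne {κ ν : Type} [BEq κ] [LawfulBEq κ] (d : PySem.Dict κ ν) (k x : κ) (v : ν)
    (h : x ≠ k) : (d.erase k).getD x v = d.getD x v := by
  rw [PySem.Dict.getD_eq_get?_getD, pvGet?_erase_of_ne d k x h, PySem.Dict.getD_eq_get?_getD]

theorem pvMem_keys_erase {κ ν : Type} [BEq κ] [LawfulBEq κ] (d : PySem.Dict κ ν) (k x : κ) :
    x ∈ (d.erase k).keys ↔ x ∈ d.keys ∧ x ≠ k := by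
  rw [pvKeys_erase]
  simp [List.mem_filter]

theorem pvNodup_keys_erase {κ ν : Type} [BEq κ] (d : PySem.Dict κ ν) (k : κ)
    (h : d.keys.Nodup) : (d.erase k).keys.Nodup := by
  rw [pvKeys_erase]
  exact List.Nodup.sublist List.filter_sublist h

theorem pvDecr_spec (elems : List (List Int)) : ∀ (d : pvD1), d.keys.Nodup → elems.Nodup →
    (∀ e ∈ elems, 0 < d.getD e 0) →
    (pvDecr d elems).keys.Nodup ∧
    (∀ e, (pvDecr d elems).getD e 0 = d.getD e 0 - (if e ∈ elems then 1 else 0)) ∧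
    (∀ e, e ∈ (pvDecr d elems).keys ↔ e ∈ d.keys ∧ ¬(e ∈ elems ∧ d.getD e 0 = 1)) := by
  induction elems with
  | nil =>
    intro d hk _ _
    refine ⟨hk, ?_, ?_⟩
    · intro w; simp [pvDecr]
    · intro w; simp [pvDecr]
  | cons a es ih =>
    intro d hk hnd hpos
    have hane : a ∉ es := (List.nodup_cons.mp hnd).1
    have hpa : 0 < d.getD a 0 := hpos a List.mem_cons_self
    have hamem : a ∈ d.keys := by
      rcases hget : d.get? a with _ | v
      · rw [PySem.Dict.getD_eq_get?_getD, hget] at hpa; simp at hpa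
      · exact PySem.Dict.mem_keys_of_mem_items _ (PySem.Dict.mem_items_of_get?_eq_some _ hget)
    have hstep : pvDecr d (a :: es) = pvDecr (if d.getD a 0 - 1 = 0 then d.erase a else d.insert a (d.getD a 0 - 1)) es := by
      simp only [pvDecr, List.foldl_cons]
    set d1 : pvD1 := if d.getD a 0 - 1 = 0 then d.erase a else d.insert a (d.getD a 0 - 1) with hd1
    have h1k : d1.keys.Nodup := by
      rw [hd1]; split
      · exact pvNodup_keys_erase d a hk
      · exact PySem.Dict.nodup_keys_insert d a _ hk
    have h1getD : ∀ w, d1.getD w 0 = d.getD w 0 - (if w = a then 1 else 0) := by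
      intro w
      by_cases hw : w = a
      · subst hw
        rw [hd1]; split
        · rename_i h0; rw [pvGetD_erase_self]; simp only [if_pos]; omega
        · rw [PySem.Dict.getD_insert_self]; simp
      · rw [hd1]; split
        · rw [pvGetD_erase_of_ne d a w 0 hw]; simp
        · rw [PySem.Dict.getD_insert_of_ne d _ _ hw]; simp
    have h1mem : ∀ w, w ∈ d1.keys ↔ (w ∈ d.keys ∧ ¬(w = a ∧ d.getD w 0 = 1)) := by
      intro w
      by_cases hw : w = a
      · subst hw
        rw [hd1]; split
        · rename_i h0
          rw [pvMem_keys_erase]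
          constructor
          · rintro ⟨_, h⟩; exact absurd rfl h
          · rintro ⟨_, h⟩; exact absurd ⟨rfl, by omega⟩ h
        · rename_i h0
          rw [PySem.Dict.mem_keys_insert]
          constructor
          · intro _; exact ⟨hamem, by rintro ⟨_, h1⟩; omega⟩
          · intro _; exact Or.inl rfl
      · rw [hd1]; split
        · rw [pvMem_keys_erase]; simp [hw]
        · rw [PySem.Dict.mem_keys_insert]; simp [hw]
    have h1pos : ∀ w ∈ es, 0 < d1.getD w 0 := by
      intro w hwes
      have hw : w ≠ a := fun h => hane (h ▸ hwes)
      rw [h1getD w]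
      simp only [hw, if_false]
      have := hpos w (List.mem_cons_of_mem _ hwes)
      omega
    obtain ⟨c1, c2, c3⟩ := ih d1 h1k (List.nodup_cons.mp hnd).2 h1pos
    rw [hstep]
    refine ⟨c1, ?_, ?_⟩
    · intro w
      rw [c2 w, h1getD w]
      by_cases hw : w = a
      · subst hw; simp [hane]
      · simp [hw, List.mem_cons]
    · intro w
      rw [c3 w, h1mem w, h1getD w]
      by_cases hw : w = a
      · subst hw
        have hmem : w ∈ (w :: es) := List.mem_cons_self
        simp only [hmem, true_and]
        have hnes : w ∉ es := hane
        tauto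
      · have hmem : (w ∈ a :: es) ↔ w ∈ es := by simp [List.mem_cons, hw]
        simp only [if_neg hw, hmem, sub_zero]
        tauto

theorem pvDictOf_keys_pairwise (cov : List (List (List Int))) :
    (((pvDictOf cov).items).map (fun q => q.1)).Pairwise (· < ·) := by
  have h1 : (PySem.List.enumerate cov 0).Pairwise (fun p q => p.1 < q.1) :=
    PySem.List.pairwise_lt_enumerate cov 0
  have h2 := h1.sublist (List.filter_sublist (p := fun p => !p.2.isEmpty))
  exact List.pairwise_map.mpr h2

theorem pvDictOf_mem_items (cov : List (List (List Int))) (q : Int × List (List Int))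
    (hq : q ∈ (pvDictOf cov).items) :
    0 ≤ q.1 ∧ q.1.toNat < cov.length ∧ q.2 = cov.getD q.1.toNat [] ∧ q.2 ≠ [] := by
  have hmem : q ∈ PySem.List.enumerate cov 0 := List.mem_of_mem_filter hq
  have hne : q.2 ≠ [] := by
    have := List.of_mem_filter hq
    simpa using this
  rw [PySem.List.mem_enumerate_iff] at hmem
  obtain ⟨j, hj, hq'⟩ := hmem
  subst hq'
  simp only [zero_add]
  refine ⟨Int.natCast_nonneg j, ?_, ?_, hne⟩
  · simpa using hj
  · rw [Int.toNat_natCast, List.getD_eq_getElem?_getD, List.getElem?_eq_getElem hj]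
    rfl

theorem pvDictOf_mem_items_of_ne (cov : List (List (List Int))) (j : Nat)
    (hj : j < cov.length) (hne : cov.getD j [] ≠ []) :
    ((j : Int), cov.getD j []) ∈ (pvDictOf cov).items := by
  apply List.mem_filter.mpr
  constructor
  · rw [PySem.List.mem_enumerate_iff]
    refine ⟨j, hj, ?_⟩
    rw [List.getD_eq_getElem?_getD, List.getElem?_eq_getElem hj]
    simp
  · simpa using hne

theorem pvFoldlSet_spec (f : pvD1 → List (List Int) → pvD1) :
    ∀ (L : List (Int × List (List Int))) (G : List pvD1),
    (L.map (fun q => q.1)).Pairwise (· < ·) →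
    (∀ q ∈ L, 0 ≤ q.1 ∧ q.1.toNat < G.length) →
    (L.foldl (fun G q => G.set q.1.toNat (f (G.getD q.1.toNat PySem.Dict.empty) q.2)) G).length = G.length ∧
    (∀ q ∈ L,
      (L.foldl (fun G q => G.set q.1.toNat (f (G.getD q.1.toNat PySem.Dict.empty) q.2)) G).getD q.1.toNat PySem.Dict.empty
        = f (G.getD q.1.toNat PySem.Dict.empty) q.2) ∧
    (∀ j : Nat, (¬ ∃ q ∈ L, q.1 = (j : Int)) →
      (L.foldl (fun G q => G.set q.1.toNat (f (G.getD q.1.toNat PySem.Dict.empty) q.2)) G).getD j PySem.Dict.empty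
        = G.getD j PySem.Dict.empty) := by
  intro L
  induction L with
  | nil => intro G _ _; exact ⟨rfl, by simp, by simp⟩
  | cons a L ih =>
    intro G hpw hb
    obtain ⟨ha0, haG⟩ := hb a List.mem_cons_self
    set G1 : List pvD1 := G.set a.1.toNat (f (G.getD a.1.toNat PySem.Dict.empty) a.2) with hG1
    have hlen1 : G1.length = G.length := List.length_set
    have hpc := List.pairwise_cons.mp (List.pairwise_map.mp hpw)
    have hpw' : (L.map (fun q => q.1)).Pairwise (· < ·) := List.pairwise_map.mpr hpc.2
    have hagt : ∀ q ∈ L, a.1 < q.1 := hpc.1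
    have hb' : ∀ q ∈ L, 0 ≤ q.1 ∧ q.1.toNat < G1.length := by
      intro q hq
      obtain ⟨h1, h2⟩ := hb q (List.mem_cons_of_mem _ hq)
      exact ⟨h1, by rw [hlen1]; exact h2⟩
    obtain ⟨ihlen, ihmem, ihother⟩ := ih G1 hpw' hb'
    have hG1getD : ∀ j : Nat, j ≠ a.1.toNat → G1.getD j PySem.Dict.empty = G.getD j PySem.Dict.empty := by
      intro j hj
      rw [hG1, List.getD_eq_getElem?_getD, List.getD_eq_getElem?_getD, List.getElem?_set]
      simp [Ne.symm hj]
    have hG1getDa : G1.getD a.1.toNat PySem.Dict.empty = f (G.getD a.1.toNat PySem.Dict.empty) a.2 := by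
      rw [hG1, List.getD_eq_getElem?_getD, List.getElem?_set]
      simp [haG]
    refine ⟨by simpa [hlen1] using ihlen, ?_, ?_⟩
    · intro q hq
      rcases List.mem_cons.mp hq with h | h
      · subst h
        have : ¬ ∃ q' ∈ L, q'.1 = ((q.1.toNat : Nat) : Int) := by
          rintro ⟨q', hq', he⟩
          have := hagt q' hq'
          rw [Int.toNat_of_nonneg ha0] at he
          omega
        rw [List.foldl_cons]
        rw [ihother q.1.toNat this]
        exact hG1getDa
      · rw [List.foldl_cons, ihmem q h, hG1getD q.1.toNat]
        intro hcl
        have h1 := hagt q h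
        obtain ⟨hq0, _⟩ := hb q (List.mem_cons_of_mem _ h)
        omega
    · intro j hj
      have hja : a.1 ≠ (j : Int) := by
        intro h; exact hj ⟨a, List.mem_cons_self, h⟩
      rw [List.foldl_cons, ihother j (by rintro ⟨q', hq', he⟩; exact hj ⟨q', List.mem_cons_of_mem _ hq', he⟩)]
      apply hG1getD
      intro h
      exact hja (by omega)

theorem pvCnt_append_singleton (l : List pvPair) (p : pvPair) (j : Nat) (e : List Int) :
    pvCnt (l ++ [p]) j e = pvCnt l j e + (if e ∈ p.2.getD j [] then 1 else 0) := by
  simp [pvCnt, List.countP_append, List.countP_cons]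

theorem pvCnt_middle (l1 l2 : List pvPair) (p : pvPair) (j : Nat) (e : List Int) :
    pvCnt (l1 ++ p :: l2) j e = pvCnt (l1 ++ l2) j e + (if e ∈ p.2.getD j [] then 1 else 0) := by
  simp [pvCnt, List.countP_append, List.countP_cons]
  omega

theorem pvModels_add (G : List pvD1) (T : Nat) (l : List pvPair) (p : pvPair)
    (hlen : p.2.length = T) (hnd : ∀ x ∈ p.2, x.Nodup) (hM : pvModels G T l) :
    pvModels (pvAddCoverage G (pvDictOf p.2)) T (l ++ [p]) := by
  obtain ⟨hGlen, hMj⟩ := hM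
  have hb : ∀ q ∈ (pvDictOf p.2).items, 0 ≤ q.1 ∧ q.1.toNat < G.length := by
    intro q hq
    obtain ⟨h1, h2, _, _⟩ := pvDictOf_mem_items p.2 q hq
    exact ⟨h1, by omega⟩
  obtain ⟨hlen', hmem', hoth'⟩ :=
    pvFoldlSet_spec pvIncr (pvDictOf p.2).items G (pvDictOf_keys_pairwise p.2) hb
  refine ⟨by rw [pvAddCoverage, hlen', hGlen], ?_⟩
  intro j hj
  obtain ⟨hk1, hk2, hk3⟩ := hMj j hj
  by_cases hcov : p.2.getD j [] = []
  · have hno : ¬ ∃ q ∈ (pvDictOf p.2).items, q.1 = (j : Int) := by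
      rintro ⟨q, hq, hqj⟩
      obtain ⟨_, _, hq2, hq3⟩ := pvDictOf_mem_items p.2 q hq
      rw [hqj] at hq2
      simp only [Int.toNat_natCast] at hq2
      exact hq3 (hq2.trans hcov)
    have heq : (pvAddCoverage G (pvDictOf p.2)).getD j PySem.Dict.empty = G.getD j PySem.Dict.empty :=
      hoth' j hno
    rw [heq]
    refine ⟨hk1, ?_, ?_⟩
    · intro e; rw [pvCnt_append_singleton, hcov, hk2 e]; simp
    · intro e; rw [pvCnt_append_singleton, hcov]; simpa using hk3 e
  · have hjlen : j < p.2.length := by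
      by_contra h
      exact hcov (by rw [List.getD_eq_getElem?_getD, List.getElem?_eq_none (by omega)]; rfl)
    have hq0 := pvDictOf_mem_items_of_ne p.2 j hjlen hcov
    have heq := hmem' _ hq0
    simp only [Int.toNat_natCast] at heq
    have hnd' : (p.2.getD j []).Nodup := by
      rw [List.getD_eq_getElem?_getD, List.getElem?_eq_getElem hjlen]
      exact hnd _ (List.getElem_mem hjlen)
    rw [pvAddCoverage, heq]
    refine ⟨pvIncr_keys_nodup _ _ hk1, ?_, ?_⟩
    · intro e
      rw [pvIncr_getD _ _ hnd' e, pvCnt_append_singleton, hk2 e]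
      by_cases he : e ∈ p.2.getD j []
      · rw [if_pos he, if_pos he]; push_cast; ring
      · rw [if_neg he, if_neg he]; push_cast; ring
    · intro e
      rw [pvIncr_mem_keys, pvCnt_append_singleton, hk3 e]
      by_cases he : e ∈ p.2.getD j []
      · rw [if_pos he]
        constructor
        · intro _; omega
        · intro _; exact Or.inr he
      · rw [if_neg he]
        simp only [he, or_false]
        omega

theorem pvModels_remove (G : List pvD1) (T : Nat) (l1 l2 : List pvPair) (p : pvPair)
    (hM : pvModels G T (l1 ++ p :: l2)) (hWF : pvWF T (l1 ++ p :: l2)) :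
    pvModels (pvRemoveCoverage G (pvDictOf p.2)) T (l1 ++ l2) := by
  obtain ⟨hGlen, hMj⟩ := hM
  obtain ⟨hlenp, hndp⟩ := hWF p (by simp)
  have hb : ∀ q ∈ (pvDictOf p.2).items, 0 ≤ q.1 ∧ q.1.toNat < G.length := by
    intro q hq
    obtain ⟨h1, h2, _, _⟩ := pvDictOf_mem_items p.2 q hq
    exact ⟨h1, by omega⟩
  obtain ⟨hlen', hmem', hoth'⟩ :=
    pvFoldlSet_spec pvDecr (pvDictOf p.2).items G (pvDictOf_keys_pairwise p.2) hb
  refine ⟨by rw [pvRemoveCoverage, hlen', hGlen], ?_⟩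
  intro j hj
  obtain ⟨hk1, hk2, hk3⟩ := hMj j hj
  by_cases hcov : p.2.getD j [] = []
  · have hno : ¬ ∃ q ∈ (pvDictOf p.2).items, q.1 = (j : Int) := by
      rintro ⟨q, hq, hqj⟩
      obtain ⟨_, _, hq2, hq3⟩ := pvDictOf_mem_items p.2 q hq
      rw [hqj] at hq2
      simp only [Int.toNat_natCast] at hq2
      exact hq3 (hq2.trans hcov)
    have heq : (pvRemoveCoverage G (pvDictOf p.2)).getD j PySem.Dict.empty = G.getD j PySem.Dict.empty :=
      hoth' j hno
    rw [heq]
    refine ⟨hk1, ?_, ?_⟩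
    · intro e
      rw [hk2 e, pvCnt_middle, hcov]; simp
    · intro e
      rw [hk3 e, pvCnt_middle l1 l2 p j e, hcov]; simp
  · have hjlen : j < p.2.length := by
      by_contra h
      exact hcov (by rw [List.getD_eq_getElem?_getD, List.getElem?_eq_none (by omega)]; rfl)
    have hq0 := pvDictOf_mem_items_of_ne p.2 j hjlen hcov
    have heq := hmem' _ hq0
    simp only [Int.toNat_natCast] at heq
    have hnd' : (p.2.getD j []).Nodup := by
      rw [List.getD_eq_getElem?_getD, List.getElem?_eq_getElem hjlen]
      exact hndp _ (List.getElem_mem hjlen)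
    have hpos : ∀ e ∈ p.2.getD j [], 0 < (G.getD j PySem.Dict.empty).getD e 0 := by
      intro e he
      rw [hk2 e]
      have : 0 < pvCnt (l1 ++ p :: l2) j e := by
        apply List.countP_pos_iff.mpr
        exact ⟨p, by simp, by simpa using he⟩
      omega
    obtain ⟨hd1, hd2, hd3⟩ := pvDecr_spec (p.2.getD j []) _ hk1 hnd' hpos
    rw [pvRemoveCoverage, heq]
    refine ⟨hd1, ?_, ?_⟩
    · intro e
      rw [hd2 e, hk2 e, pvCnt_middle l1 l2 p j e]
      by_cases he : e ∈ p.2.getD j []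
      · rw [if_pos he, if_pos he]; push_cast; ring
      · rw [if_neg he, if_neg he]; push_cast; ring
    · intro e
      rw [hd3 e, hk3 e, hk2 e, pvCnt_middle l1 l2 p j e]
      by_cases he : e ∈ p.2.getD j []
      · simp only [he, if_true, true_and]
        omega
      · simp only [he, if_false, false_and, not_false_iff, and_true]
        omega

theorem pvModels_init (T : Nat) :
    ∀ (l2 l1 : List pvPair) (G : List pvD1), pvModels G T l1 →
    (∀ p ∈ l2, p.2.length = T ∧ ∀ x ∈ p.2, x.Nodup) →
    pvModels ((l2.map fun p => pvDictOf p.2).foldl pvAddCoverage G) T (l1 ++ l2) := by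
  intro l2
  induction l2 with
  | nil => intro l1 G hM _; simpa using hM
  | cons p l2 ih =>
    intro l1 G hM hWF
    obtain ⟨h1, h2⟩ := hWF p List.mem_cons_self
    have hstep := pvModels_add G T l1 p h1 h2 hM
    have := ih (l1 ++ [p]) _ hstep (fun q hq => hWF q (List.mem_cons_of_mem _ hq))
    simpa using this

theorem pvUnionFold (idx : Int) : ∀ (others : List pvPair) (acc : List (List Int)), acc.Nodup →
    (others.foldl (fun acc o => PySem.Set.union acc (o.2.getD idx.toNat [])) acc).Nodup ∧
    (∀ e, e ∈ others.foldl (fun acc o => PySem.Set.union acc (o.2.getD idx.toNat [])) acc ↔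
      e ∈ acc ∨ ∃ o ∈ others, e ∈ o.2.getD idx.toNat []) := by
  intro others
  induction others with
  | nil => intro acc h; exact ⟨h, by simp⟩
  | cons o os ih =>
    intro acc h
    have h1 : (PySem.Set.union acc (o.2.getD idx.toNat [])).Nodup :=
      PySem.Set.nodup_union _ _ h
    obtain ⟨n2, m2⟩ := ih _ h1
    refine ⟨n2, ?_⟩
    intro e
    rw [List.foldl_cons, m2 e]
    simp only [PySem.Set.union, PySem.Set.mem_update]
    constructor
    · rintro (⟨h' | h'⟩ | ⟨o', ho', he'⟩)
      · exact Or.inl h'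
      · exact Or.inr ⟨o, List.mem_cons_self, h'⟩
      · exact Or.inr ⟨o', List.mem_cons_of_mem _ ho', he'⟩
    · rintro (h' | ⟨o', ho', he'⟩)
      · exact Or.inl (Or.inl h')
      · rcases List.mem_cons.mp ho' with h'' | h''
        · subst h''; exact Or.inl (Or.inr he')
        · exact Or.inr ⟨o', h'', he'⟩

theorem pvUnionAt_spec (others : List pvPair) (idx : Int) :
    (pvUnionAt others idx).Nodup ∧
    (∀ e, e ∈ pvUnionAt others idx ↔ ∃ o ∈ others, e ∈ o.2.getD idx.toNat []) := by
  obtain ⟨h1, h2⟩ := pvUnionFold idx others [] List.nodup_nil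
  exact ⟨h1, fun e => by rw [pvUnionAt, h2 e]; simp⟩

theorem pvModels_nil (T : Nat) :
    pvModels (List.replicate T PySem.Dict.empty) T [] := by
  refine ⟨List.length_replicate, ?_⟩
  intro j hj
  have : (List.replicate T (PySem.Dict.empty : pvD1)).getD j PySem.Dict.empty = PySem.Dict.empty := by
    rw [List.getD_eq_getElem?_getD, List.getElem?_replicate]
    simp [hj]
  rw [this]
  refine ⟨by simp [PySem.Dict.keys_empty], fun e => by simp [PySem.Dict.getD_empty, pvCnt], fun e => by simp [PySem.Dict.keys_empty, pvCnt]⟩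

theorem pvCombos_ne_nil (r : Nat) (xs : List Int) (h : r ≤ xs.length) :
    pvCombos r xs ≠ [] := by
  induction xs generalizing r with
  | nil =>
    cases r with
    | zero => simp [pvCombos]
    | succ r => simp at h
  | cons x xs ih =>
    cases r with
    | zero => simp [pvCombos]
    | succ r =>
      have h1 : pvCombos r xs ≠ [] := ih r (by simpa using Nat.le_of_succ_le_succ h)
      simp [pvCombos, List.append_eq_nil_iff, h1]

theorem pvScan_congr (p q : Nat → Bool) : ∀ (n i : Nat),
    (∀ j, i ≤ j → j < i + n → p j = q j) → pvScan p n i = pvScan q n i := by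
  intro n
  induction n with
  | zero => intro i h; rfl
  | succ n ih =>
    intro i h
    have hpi : p i = q i := h i le_rfl (by omega)
    simp only [pvScan, hpi]
    split
    · rfl
    · exact ih (i + 1) (fun j h1 h2 => h j (by omega) (by omega))

theorem pvScan_eq_some (p : Nat → Bool) : ∀ (n i j : Nat),
    pvScan p n i = some j → i ≤ j ∧ j < i + n ∧ p j = true := by
  intro n
  induction n with
  | zero => intro i j h; simp [pvScan] at h
  | succ n ih =>
    intro i j h
    simp only [pvScan] at h
    by_cases hp : p i
    · simp [hp] at h; subst h; exact ⟨le_rfl, by omega, hp⟩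
    · simp [hp] at h
      obtain ⟨h1, h2, h3⟩ := ih (i + 1) j h
      exact ⟨by omega, by omega, h3⟩

theorem pvScan_first (p : Nat → Bool) : ∀ (n i j : Nat), i ≤ j → j < i + n →
    (∀ x, i ≤ x → x < j → p x = false) → p j = true → pvScan p n i = some j := by
  intro n
  induction n with
  | zero => intro i j h1 h2; omega
  | succ n ih =>
    intro i j h1 h2 hf ht
    simp only [pvScan]
    rcases Nat.eq_or_lt_of_le h1 with heq | hlt
    · subst heq; simp [ht]
    · have : p i = false := hf i le_rfl hlt
      simp [this]
      exact ih (i + 1) j (by omega) (by omega) (fun x hx1 hx2 => hf x (by omega) hx2) ht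

theorem pvScan_none (p : Nat → Bool) : ∀ (n i : Nat),
    (∀ x, i ≤ x → x < i + n → p x = false) → pvScan p n i = none := by
  intro n
  induction n with
  | zero => intro i h; rfl
  | succ n ih =>
    intro i h
    have : p i = false := h i le_rfl (by omega)
    simp only [pvScan, this]
    simp
    exact ih (i + 1) (fun x h1 h2 => h x (by omega) (by omega))

theorem pvFoldlIf {β : Type} (l : List β) (c : β → Prop) [DecidablePred c]
    (k : β → Int) (v : β → List (List Int)) :
    ∀ (d : PySem.Dict Int (List (List Int))),
    l.foldl (fun cm p => if c p then cm.insert (k p) (v p) else cm) d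
      = (l.filter (fun p => decide (c p))).foldl (fun cm p => cm.insert (k p) (v p)) d := by
  induction l with
  | nil => intro d; rfl
  | cons a l ih =>
    intro d
    by_cases h : c a
    · rw [List.foldl_cons, if_pos h, List.filter_cons_of_pos (by simpa using h), List.foldl_cons, ih]
    · rw [List.foldl_cons, if_neg h, List.filter_cons_of_neg (by simpa using h), ih]

theorem pvEnumerate_map {α β : Type} (g : α → β) (xs : List α) : ∀ (n : Int),
    PySem.List.enumerate (xs.map g) n = (PySem.List.enumerate xs n).map (fun p => (p.1, g p.2)) := by
  induction xs with
  | nil => intro n; simp [PySem.List.enumerate_nil]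
  | cons x xs ih => intro n; simp [PySem.List.enumerate_cons, ih]

theorem pvBuild_eq (targs : List (List Int)) (s : Int) (cand : List Int) :
    pvBuildCoverMap targs s cand = pvDictOf (pvComboSets targs s cand) := by
  apply PySem.Dict.ext
  have h1 : (pvBuildCoverMap targs s cand).items
      = ((PySem.List.enumerate targs 0).filter
          (fun p => decide (s ≤ ((pvInterSorted cand p.2).length : Int)))).map
          (fun p => (p.1, PySem.Set.ofList (pvCombos s.toNat (pvInterSorted cand p.2)))) := by
    show ((PySem.List.enumerate targs 0).foldl
        (fun cm p => if s ≤ ((pvInterSorted cand p.2).length : Int) then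
          cm.insert p.1 (PySem.Set.ofList (pvCombos s.toNat (pvInterSorted cand p.2))) else cm)
        PySem.Dict.empty).items = _
    rw [pvFoldlIf (PySem.List.enumerate targs 0)
      (fun p => s ≤ ((pvInterSorted cand p.2).length : Int)) (fun p => p.1)
      (fun p => PySem.Set.ofList (pvCombos s.toNat (pvInterSorted cand p.2))) PySem.Dict.empty]
    have hpw : ((PySem.List.enumerate targs 0).filter
        (fun p => decide (s ≤ ((pvInterSorted cand p.2).length : Int)))).Pairwise
        (fun p q => p.1 < q.1) :=
      (PySem.List.pairwise_lt_enumerate targs 0).sublist List.filter_sublist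
    have hnd : (((PySem.List.enumerate targs 0).filter
        (fun p => decide (s ≤ ((pvInterSorted cand p.2).length : Int)))).map
        (fun (p : Int × List Int) => p.1)).Nodup :=
      (List.pairwise_map.mpr hpw).imp ne_of_lt
    rw [PySem.Dict.items_foldl_insert_fresh
      ((PySem.List.enumerate targs 0).filter
        (fun p => decide (s ≤ ((pvInterSorted cand p.2).length : Int))))
      (fun p => p.1)
      (fun p => PySem.Set.ofList (pvCombos s.toNat (pvInterSorted cand p.2)))
      PySem.Dict.empty (fun a _ => PySem.Dict.contains_empty a.1) hnd]
    rfl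
  rw [h1]
  show _ = (PySem.List.enumerate (targs.map fun t =>
      if s ≤ ((pvInterSorted cand t).length : Int) then
        PySem.Set.ofList (pvCombos s.toNat (pvInterSorted cand t)) else []) 0).filter
      (fun p => !p.2.isEmpty)
  rw [pvEnumerate_map, List.filter_map]
  have hfc : ∀ q ∈ PySem.List.enumerate targs 0,
      ((fun (p : Int × List (List Int)) => !p.2.isEmpty) ∘ (fun p => (p.1,
        if s ≤ ((pvInterSorted cand p.2).length : Int) then
          PySem.Set.ofList (pvCombos s.toNat (pvInterSorted cand p.2)) else []))) q
      = decide (s ≤ ((pvInterSorted cand q.2).length : Int)) := by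
    intro q _
    by_cases h : s ≤ ((pvInterSorted cand q.2).length : Int)
    · have hne : pvCombos s.toNat (pvInterSorted cand q.2) ≠ [] :=
        pvCombos_ne_nil _ _ (by omega)
      have hne2 : PySem.Set.ofList (pvCombos s.toNat (pvInterSorted cand q.2)) ≠ [] := by
        obtain ⟨x, hx⟩ := List.exists_mem_of_ne_nil _ hne
        exact List.ne_nil_of_mem ((PySem.Set.mem_ofList _ x).mpr hx)
      simp [h, hne2]
    · simp [h]
  rw [List.filter_congr hfc]
  apply List.map_congr_left
  intro q hq
  have hc := (List.mem_filter.mp hq).2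
  simp only [decide_eq_true_eq] at hc
  simp [hc]

theorem pvCheck_mono (rc : Int) (cov : List (List (List Int))) {o1 o2 : List pvPair}
    (h : o1.Sublist o2) (hc : pvCheck rc o1 cov = true) : pvCheck rc o2 cov = true := by
  rw [pvCheck, List.all_eq_true] at hc ⊢
  intro q hq
  have hq1 := hc q hq
  by_cases he : q.2.isEmpty
  · simp [he]
  · simp only [he, Bool.false_or, decide_eq_true_eq] at hq1 ⊢
    obtain ⟨hn1, hm1⟩ := pvUnionAt_spec o1 q.1
    obtain ⟨hn2, hm2⟩ := pvUnionAt_spec o2 q.1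
    have hsub : (pvUnionAt o1 q.1).toFinset ⊆ (pvUnionAt o2 q.1).toFinset := by
      intro e hme
      rw [List.mem_toFinset] at hme ⊢
      obtain ⟨o, ho, hoe⟩ := (hm1 e).mp hme
      exact (hm2 e).mpr ⟨o, h.subset ho, hoe⟩
    have hlen : (pvUnionAt o1 q.1).length ≤ (pvUnionAt o2 q.1).length := by
      rw [← List.toFinset_card_of_nodup hn1, ← List.toFinset_card_of_nodup hn2]
      exact Finset.card_le_card hsub
    have : ((pvUnionAt o1 q.1).length : Int) ≤ ((pvUnionAt o2 q.1).length : Int) := by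
      exact_mod_cast hlen
    omega

theorem pvCanRemove_eq_pvCheck (rc : Int) (T : Nat) (G : List pvD1)
    (l1 l2 : List pvPair) (p : pvPair)
    (hM : pvModels G T (l1 ++ p :: l2)) (hWF : pvWF T (l1 ++ p :: l2)) :
    pvCanRemove rc G (pvDictOf p.2) = pvCheck rc (l1 ++ l2) p.2 := by
  obtain ⟨hGlen, hMj⟩ := hM
  obtain ⟨hlenp, hndp⟩ := hWF p (by simp)
  rw [pvCanRemove, pvCheck]
  rw [show (pvDictOf p.2).items = (PySem.List.enumerate p.2 0).filter (fun q => !q.2.isEmpty) from rfl]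
  rw [List.all_filter, Bool.eq_iff_iff, List.all_eq_true, List.all_eq_true]
  refine forall_congr' fun q => imp_congr_right fun hq => ?_
  rw [PySem.List.mem_enumerate_iff] at hq
  obtain ⟨jn, hjn, hq'⟩ := hq
  subst hq'
  simp only [zero_add, Bool.not_not]
  by_cases he : (p.2[jn]).isEmpty
  · simp [he]
  · simp only [he, Bool.false_or, decide_eq_true_eq, Int.toNat_natCast]
    have hjT : jn < T := by omega
    obtain ⟨hk1, hk2, hk3⟩ := hMj jn hjT
    have hgetd : p.2.getD jn [] = p.2[jn] := by
      rw [List.getD_eq_getElem?_getD, List.getElem?_eq_getElem hjn]; rfl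
    have htoNat : ((jn : Int)).toNat = jn := Int.toNat_natCast jn
    set d := G.getD jn PySem.Dict.empty with hd
    set elems := p.2[jn] with helems
    have hnd' : elems.Nodup := hndp _ (List.getElem_mem hjn)
    have hcnt : ∀ e, pvCnt (l1 ++ p :: l2) jn e
        = pvCnt (l1 ++ l2) jn e + (if e ∈ elems then 1 else 0) := by
      intro e
      rw [pvCnt_middle l1 l2 p jn e, hgetd]
    -- Finset bookkeeping
    have hKcard : d.size = d.keys.toFinset.card := by
      rw [List.toFinset_card_of_nodup hk1]
      simp [PySem.Dict.size, PySem.Dict.keys]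
    have hFlen : (elems.filter (fun e => d.getD e 0 == 1)).length
        = (elems.filter (fun e => d.getD e 0 == 1)).toFinset.card := by
      rw [List.toFinset_card_of_nodup (hnd'.filter _)]
    obtain ⟨hnU, hmU⟩ := pvUnionAt_spec (l1 ++ l2) (jn : Int)
    have hUlen : (pvUnionAt (l1 ++ l2) (jn : Int)).length
        = (pvUnionAt (l1 ++ l2) (jn : Int)).toFinset.card := by
      rw [List.toFinset_card_of_nodup hnU]
    have hUmem : ∀ e, e ∈ (pvUnionAt (l1 ++ l2) (jn : Int)).toFinset ↔ 0 < pvCnt (l1 ++ l2) jn e := by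
      intro e
      rw [List.mem_toFinset, hmU e, pvCnt, List.countP_pos_iff]
      constructor
      · rintro ⟨o, ho, hoe⟩; exact ⟨o, ho, by rw [htoNat] at hoe; simpa using hoe⟩
      · rintro ⟨o, ho, hoe⟩; exact ⟨o, ho, by rw [htoNat]; simpa using hoe⟩
    have hKmem : ∀ e, e ∈ d.keys.toFinset ↔ 0 < pvCnt (l1 ++ l2) jn e + (if e ∈ elems then 1 else 0) := by
      intro e
      rw [List.mem_toFinset, hk3 e, hcnt e]
    have hFmem : ∀ e, e ∈ (elems.filter (fun e => d.getD e 0 == 1)).toFinset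
        ↔ e ∈ elems ∧ pvCnt (l1 ++ l2) jn e + (if e ∈ elems then 1 else 0) = 1 := by
      intro e
      rw [List.mem_toFinset, List.mem_filter]
      constructor
      · rintro ⟨h1, h2⟩
        refine ⟨h1, ?_⟩
        have := hk2 e
        rw [hcnt e] at this
        simp only [beq_iff_eq] at h2
        rw [h2] at this
        exact_mod_cast this.symm
      · rintro ⟨h1, h2⟩
        refine ⟨h1, ?_⟩
        have := hk2 e
        rw [hcnt e, h2] at this
        simp [this]
    have hdisj : Disjoint (pvUnionAt (l1 ++ l2) (jn : Int)).toFinset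
        (elems.filter (fun e => d.getD e 0 == 1)).toFinset := by
      rw [Finset.disjoint_left]
      intro e h1 h2
      rw [hUmem e] at h1
      obtain ⟨hm1, hm2⟩ := (hFmem e).mp h2
      simp only [hm1, if_true] at hm2
      omega
    have hunion : d.keys.toFinset
        = (pvUnionAt (l1 ++ l2) (jn : Int)).toFinset ∪ (elems.filter (fun e => d.getD e 0 == 1)).toFinset := by
      apply Finset.ext
      intro e
      rw [Finset.mem_union, hKmem e, hUmem e, hFmem e]
      by_cases hee : e ∈ elems
      · simp only [hee, if_true, true_and]
        omega
      · simp only [hee, if_false, false_and, or_false]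
        omega
    have hcards : d.keys.toFinset.card
        = (pvUnionAt (l1 ++ l2) (jn : Int)).toFinset.card
          + (elems.filter (fun e => d.getD e 0 == 1)).toFinset.card := by
      rw [hunion, Finset.card_union_of_disjoint hdisj]
    have hfinal : (d.size : Int) - ((elems.filter (fun e => d.getD e 0 == 1)).length : Int)
        = ((pvUnionAt (l1 ++ l2) (jn : Int)).length : Int) := by
      rw [hKcard, hFlen, hUlen, hcards]
      push_cast
      ring
    rw [hfinal]

theorem pvSnocSplit {α : Type} (kept : List α) (p : α) (k1 : List α) (x : α) (k2 : List α)
    (h : kept ++ [p] = k1 ++ x :: k2) :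
    (k2 = [] ∧ k1 = kept ∧ x = p) ∨ (∃ k2', k2 = k2' ++ [p] ∧ kept = k1 ++ x :: k2') := by
  rcases k2.eq_nil_or_concat with hk2 | ⟨k2', y, hk2⟩
  · subst hk2
    have h1 : kept ++ [p] = k1 ++ [x] := h
    obtain ⟨ha, hb⟩ := List.append_inj' h1 rfl
    exact Or.inl ⟨rfl, ha.symm, by simpa using hb.symm⟩
  · subst hk2
    rw [List.concat_eq_append] at h
    have h1 : kept ++ [p] = (k1 ++ x :: k2') ++ [y] := by simpa using h
    obtain ⟨ha, hb⟩ := List.append_inj' h1 rfl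
    have hy : y = p := by simpa using hb.symm
    subst hy
    exact Or.inr ⟨k2', by simp, ha⟩

theorem pvSplitAt (l : List pvPair) (j : Nat) (hj : j < l.length) :
    l = l.take j ++ (l.getD j ([], [])) :: l.drop (j + 1) := by
  have h1 : l.getD j ([], []) = l[j] := by
    rw [List.getD_eq_getElem?_getD, List.getElem?_eq_getElem hj]; rfl
  rw [h1, ← List.drop_eq_getElem_cons hj, List.take_append_drop]

theorem pvLoopA_eq_pure (rc : Int) (T : Nat) : ∀ (fuel : Nat) (l : List pvPair) (G : List pvD1),
    pvModels G T l → pvWF T l →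
    pvLoopA rc fuel (l.map Prod.fst) (l.map fun p => pvDictOf p.2) G
      = (pvPure rc fuel l).map Prod.fst := by
  intro fuel
  induction fuel with
  | zero => intro l G _ _; rfl
  | succ fuel ih =>
    intro l G hM hWF
    simp only [pvLoopA, pvPure, List.length_map]
    by_cases hlen : l.length ≤ 1
    · rw [if_pos hlen, if_pos hlen]
    · rw [if_neg hlen, if_neg hlen]
      have hscan : pvScan (fun i => pvCanRemove rc G ((l.map fun p => pvDictOf p.2).getD i PySem.Dict.empty)) l.length 0
          = pvScan (fun i => pvCheck rc (l.eraseIdx i) ((l.getD i ([], [])).2)) l.length 0 := by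
        apply pvScan_congr
        intro j hj0 hjn
        have hjl : j < l.length := by omega
        have h1 : (l.map fun p => pvDictOf p.2).getD j PySem.Dict.empty = pvDictOf ((l.getD j ([], [])).2) := by
          rw [List.getD_eq_getElem?_getD, List.getElem?_map, List.getElem?_eq_getElem hjl,
              List.getD_eq_getElem?_getD, List.getElem?_eq_getElem hjl]
          rfl
        rw [h1]
        have hsplit := pvSplitAt l j hjl
        have hM' : pvModels G T (l.take j ++ (l.getD j ([], [])) :: l.drop (j + 1)) := by
          rw [← hsplit]; exact hM
        have hWF' : pvWF T (l.take j ++ (l.getD j ([], [])) :: l.drop (j + 1)) := by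
          rw [← hsplit]; exact hWF
        have := pvCanRemove_eq_pvCheck rc T G (l.take j) (l.drop (j + 1)) _ hM' hWF'
        rw [this, List.eraseIdx_eq_take_drop_succ]
      rw [hscan]
      cases hcase : pvScan (fun i => pvCheck rc (l.eraseIdx i) ((l.getD i ([], [])).2)) l.length 0 with
      | none => rfl
      | some i =>
        obtain ⟨_, hi, _⟩ := pvScan_eq_some _ _ _ _ hcase
        have hil : i < l.length := by omega
        have h1 : (l.map fun p => pvDictOf p.2).getD i PySem.Dict.empty = pvDictOf ((l.getD i ([], [])).2) := by
          rw [List.getD_eq_getElem?_getD, List.getElem?_map, List.getElem?_eq_getElem hil,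
              List.getD_eq_getElem?_getD, List.getElem?_eq_getElem hil]
          rfl
        show pvLoopA rc fuel ((l.map Prod.fst).eraseIdx i) ((l.map fun p => pvDictOf p.2).eraseIdx i)
            (pvRemoveCoverage G ((l.map fun p => pvDictOf p.2).getD i PySem.Dict.empty))
          = (pvPure rc fuel (l.eraseIdx i)).map Prod.fst
        rw [List.eraseIdx_map, List.eraseIdx_map, h1]
        have hsplit := pvSplitAt l i hil
        have hM' : pvModels G T (l.take i ++ (l.getD i ([], [])) :: l.drop (i + 1)) := by
          rw [← hsplit]; exact hM
        have hWF' : pvWF T (l.take i ++ (l.getD i ([], [])) :: l.drop (i + 1)) := by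
          rw [← hsplit]; exact hWF
        have hMrem := pvModels_remove G T (l.take i) (l.drop (i + 1)) _ hM' hWF'
        have hWFrem : pvWF T (l.eraseIdx i) := fun q hq => hWF q (List.mem_of_mem_eraseIdx hq)
        rw [List.eraseIdx_eq_take_drop_succ]
        exact ih _ _ hMrem (by rw [← List.eraseIdx_eq_take_drop_succ]; exact hWFrem)

theorem pvPure_eq_loopB (rc : Int) : ∀ (rest kept : List pvPair) (fuel : Nat),
    rest.length + 1 ≤ fuel →
    (∀ k1 x k2, kept = k1 ++ x :: k2 →
      ¬(k1 ++ k2 ++ rest ≠ [] ∧ pvCheck rc (k1 ++ k2 ++ rest) x.2 = true)) →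
    pvPure rc fuel (kept ++ rest) = pvLoopB rc kept rest := by
  intro rest
  induction rest with
  | nil =>
    intro kept fuel hfuel hinv
    cases fuel with
    | zero => omega
    | succ fuel =>
      show pvPure rc (fuel + 1) (kept ++ []) = kept
      rw [List.append_nil]
      simp only [pvPure]
      by_cases hlen : kept.length ≤ 1
      · rw [if_pos hlen]
      · rw [if_neg hlen]
        have hnone : pvScan (fun i => pvCheck rc (kept.eraseIdx i) ((kept.getD i ([], [])).2)) kept.length 0 = none := by
          apply pvScan_none
          intro j _ hjn
          have hjl : j < kept.length := by omega
          have hsplit := pvSplitAt kept j hjl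
          have hinv' := hinv (kept.take j) (kept.getD j ([], [])) (kept.drop (j + 1)) hsplit
          rw [List.append_nil] at hinv'
          rw [← List.eraseIdx_eq_take_drop_succ] at hinv'
          have hne : kept.eraseIdx j ≠ [] := by
            intro hnil
            have := congrArg List.length hnil
            rw [List.length_eraseIdx] at this
            simp [hjl] at this
            omega
          cases hch : pvCheck rc (kept.eraseIdx j) ((kept.getD j ([], [])).2) with
          | false => rfl
          | true => exact absurd ⟨hne, hch⟩ hinv'
        rw [hnone]
  | cons p rest ih =>
    intro kept fuel hfuel hinv
    by_cases hrem : (kept ++ rest) ≠ [] ∧ pvCheck rc (kept ++ rest) p.2 = true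
    · -- the candidate is dropped by both loops
      have hloopB : pvLoopB rc kept (p :: rest) = pvLoopB rc kept rest := by
        simp only [pvLoopB]
        rw [if_pos]
        rw [Bool.and_eq_true, hrem.2]
        refine ⟨?_, rfl⟩
        simp only [Bool.not_eq_true']
        rw [← Bool.not_eq_true, List.isEmpty_iff]
        exact hrem.1
      rw [hloopB]
      cases fuel with
      | zero => omega
      | succ fuel =>
        simp only [pvPure]
        have hlen2 : ¬ (kept ++ p :: rest).length ≤ 1 := by
          have h1 : 0 < (kept ++ rest).length := List.length_pos_iff.mpr hrem.1
          simp only [List.length_append] at h1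
          simp only [List.length_append, List.length_cons]
          omega
        rw [if_neg hlen2]
        have hscan : pvScan (fun i => pvCheck rc ((kept ++ p :: rest).eraseIdx i) (((kept ++ p :: rest).getD i ([], [])).2)) (kept ++ p :: rest).length 0 = some kept.length := by
          apply pvScan_first
          · omega
          · simp only [List.length_append, List.length_cons]; omega
          · intro j _ hjk
            have hjl : j < kept.length := hjk
            have herase : (kept ++ p :: rest).eraseIdx j = kept.eraseIdx j ++ p :: rest :=
              List.eraseIdx_append_of_lt_length hjl _
            have hget : (kept ++ p :: rest).getD j ([], []) = kept.getD j ([], []) := by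
              rw [List.getD_eq_getElem?_getD, List.getElem?_append_left hjl, ← List.getD_eq_getElem?_getD]
            have hsplit := pvSplitAt kept j hjl
            have hinv' := hinv (kept.take j) (kept.getD j ([], [])) (kept.drop (j + 1)) hsplit
            have herase2 : kept.eraseIdx j ++ p :: rest = kept.take j ++ kept.drop (j + 1) ++ (p :: rest) := by
              rw [List.eraseIdx_eq_take_drop_succ]
            rw [herase, hget, herase2]
            cases hch : pvCheck rc (kept.take j ++ kept.drop (j + 1) ++ (p :: rest)) ((kept.getD j ([], [])).2) with
            | false => rfl
            | true =>
              exfalso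
              exact hinv' ⟨by simp, hch⟩
          · have herase : (kept ++ p :: rest).eraseIdx kept.length = kept ++ rest := by
              rw [List.eraseIdx_append_of_length_le le_rfl]
              simp
            have hget : (kept ++ p :: rest).getD kept.length ([], []) = p := by
              rw [List.getD_eq_getElem?_getD, List.getElem?_append_right le_rfl]
              simp
            rw [herase, hget, hrem.2]
        rw [hscan]
        show pvPure rc fuel ((kept ++ p :: rest).eraseIdx kept.length) = pvLoopB rc kept rest
        have herase : (kept ++ p :: rest).eraseIdx kept.length = kept ++ rest := by
          rw [List.eraseIdx_append_of_length_le le_rfl]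
          simp
        rw [herase]
        apply ih kept fuel (by simp at hfuel; omega)
        intro k1 x k2 hk
        have hinv' := hinv k1 x k2 hk
        rintro ⟨hne, hch⟩
        apply hinv'
        refine ⟨by simp, ?_⟩
        have hsub : (k1 ++ k2 ++ rest).Sublist (k1 ++ k2 ++ (p :: rest)) :=
          (List.sublist_cons_self p rest).append_left (k1 ++ k2)
        exact pvCheck_mono rc x.2 hsub hch
    · -- the candidate is kept by both loops
      have hloopB : pvLoopB rc kept (p :: rest) = pvLoopB rc (kept ++ [p]) rest := by
        simp only [pvLoopB]
        rw [if_neg]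
        intro hcond
        rw [Bool.and_eq_true] at hcond
        apply hrem
        constructor
        · rw [Bool.not_eq_true', ← Bool.not_eq_true] at hcond
          intro hnil
          exact hcond.1 (by simp [hnil])
        · exact hcond.2
      rw [hloopB]
      have hl : kept ++ p :: rest = (kept ++ [p]) ++ rest := by simp
      rw [hl]
      apply ih (kept ++ [p]) fuel (by simp at hfuel ⊢; omega)
      intro k1 x k2 hk
      rcases pvSnocSplit kept p k1 x k2 hk with ⟨h2nil, hk1, hx⟩ | ⟨k2', hk2, hkept⟩
      · subst h2nil; subst hk1; subst hx
        simpa using hrem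
      · subst hk2
        have hinv' := hinv k1 x k2' hkept
        have hsame : k1 ++ (k2' ++ [p]) ++ rest = k1 ++ k2' ++ (p :: rest) := by simp
        rw [hsame]
        exact hinv'

theorem pvMain (final_result sample_pool : List (List Int)) (k : Int)
    (all_targets : List (List Int)) (s required_cover : Int) :
    prune_redundant_multi_py final_result sample_pool k all_targets s required_cover
      = prune_redundant_multi_py_alt final_result sample_pool k all_targets s required_cover := by
  by_cases hfr : final_result = []
  · simp [prune_redundant_multi_py, prune_redundant_multi_py_alt, hfr]
  · rw [prune_redundant_multi_py, prune_redundant_multi_py_alt, if_neg hfr, if_neg hfr]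
    set l := final_result.map (fun c => (c, pvComboSets all_targets s c)) with hl
    have hfst : l.map Prod.fst = final_result := by
      rw [hl, List.map_map]
      exact List.map_id'' (fun c => rfl) final_result
    have hcms : final_result.map (fun c => pvBuildCoverMap all_targets s c)
        = l.map (fun p => pvDictOf p.2) := by
      rw [hl, List.map_map]
      apply List.map_congr_left
      intro c _
      exact pvBuild_eq all_targets s c
    have hWFl : pvWF all_targets.length l := by
      intro p hp
      rw [hl] at hp
      obtain ⟨c, _, hc⟩ := List.mem_map.mp hp
      subst hc
      refine ⟨by simp [pvComboSets], ?_⟩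
      intro x hx
      rw [pvComboSets] at hx
      obtain ⟨t, _, ht⟩ := List.mem_map.mp hx
      by_cases hcond : s ≤ (((pvInterSorted c t)).length : Int)
      · rw [if_pos hcond] at ht
        rw [← ht]
        exact PySem.Set.nodup_ofList _
      · rw [if_neg hcond] at ht
        rw [← ht]
        exact List.nodup_nil
    have hG : pvModels ((l.map fun p => pvDictOf p.2).foldl pvAddCoverage
        (List.replicate all_targets.length PySem.Dict.empty)) all_targets.length l := by
      have := pvModels_init all_targets.length l [] _ (pvModels_nil _) hWFl
      simpa using this
    rw [hcms]
    calc pvLoopA required_cover (final_result.length + 1) final_result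
          (l.map fun p => pvDictOf p.2)
          ((l.map fun p => pvDictOf p.2).foldl pvAddCoverage
            (List.replicate all_targets.length PySem.Dict.empty))
        = pvLoopA required_cover (final_result.length + 1) (l.map Prod.fst)
          (l.map fun p => pvDictOf p.2)
          ((l.map fun p => pvDictOf p.2).foldl pvAddCoverage
            (List.replicate all_targets.length PySem.Dict.empty)) := by rw [hfst]
      _ = (pvPure required_cover (final_result.length + 1) l).map Prod.fst :=
          pvLoopA_eq_pure required_cover all_targets.length _ l _ hG hWFl
      _ = (pvLoopB required_cover [] l).map Prod.fst := by
          have hfin := pvPure_eq_loopB required_cover l [] (final_result.length + 1)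
            (by simp [hl])
            (by intro k1 x k2 h; cases k1 <;> simp at h)
          rw [List.nil_append] at hfin
          rw [hfin]

-- ===== VERDICT (by name: the statement is the Claim_ definition above) =====
theorem prune_redundant_multi_py_spec : Claim_equal_prune_redundant_multi_py := by
  intro final_result sample_pool k all_targets s required_cover _hdom _hpre
  exact pvMain final_result sample_pool k all_targets s required_cover
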